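-- pv_equiv track=rewrite | github.com/hwan-koo/Algorithm | 백준/Platinum/1215. 잘못 작성한 요세푸스 코드/잘못 작성한 요세푸스 코드.py | answer
-- ===== SOURCE A (Python) =====
-- def answer(n, k):
--     if n > k:
--         return answer(k, k) + (n-k) * k
--     i = 1
--     result = n * k
--     while i <= n:
--         j = min(n, k // (k//i))
--         result -= (k // i) * (j - i + 1) * (j + i) // 2
--         i = j + 1
--     return result
-- ===== SOURCE B (Python) =====
-- def answer(n, k):
--     m = min(n, k)
--     r = 0
--     while (r + 1) * (r + 1) <= k:
--         r += 1
--     s = 0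
--     for i in range(1, min(m, r) + 1):
--         s += (k // i) * i
--     for q in range(1, k // (r + 1) + 1):
--         lo = max(r, k // (q + 1))
--         hi = min(m, k // q)
--         if lo < hi:
--             s += q * (hi * (hi + 1) // 2 - lo * (lo + 1) // 2)
--     return n * k - s
-- ===== Notes on version B (the rewrite author's own statement) =====
-- stated objective: alternative
-- what changed: Replaces A's quotient-jumping while loop (i -> k//(k//i)+1) plus n>k self-recursion by a Dirichlet-style sqrt split: a direct sum of (k//i)*i for i up to sqrt(k) and one pass over quotient values q with closed-form triangular block sums, subtracted from n*k.
import Mathlib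
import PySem

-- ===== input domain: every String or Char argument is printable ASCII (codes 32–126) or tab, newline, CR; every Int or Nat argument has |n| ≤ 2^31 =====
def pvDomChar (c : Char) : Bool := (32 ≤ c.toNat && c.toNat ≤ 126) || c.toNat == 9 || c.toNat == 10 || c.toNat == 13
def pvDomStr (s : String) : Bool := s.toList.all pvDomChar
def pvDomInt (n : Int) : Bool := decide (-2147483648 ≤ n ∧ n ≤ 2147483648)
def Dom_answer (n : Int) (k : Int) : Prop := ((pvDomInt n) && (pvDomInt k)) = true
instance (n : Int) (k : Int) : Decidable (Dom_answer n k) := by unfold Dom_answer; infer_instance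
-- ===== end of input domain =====

-- B replaces A's quotient-jumping block walk (and its n>k self-recursion) by a
-- Dirichlet-style sqrt split over quotient values; same exact value on every input.


-- ===== PORT A =====
-- the while-loop of A; fuel only makes the recursion structurally terminating
-- (the index i strictly increases each pass whenever the loop is entered in Python)
def answerLoop (n : Int) (k : Int) : Nat → Int → Int → Int
  | 0, _, result => result
  | fuel + 1, i, result =>
    if i ≤ n then
      let j := min n (PySem.Int.floordiv k (PySem.Int.floordiv k i))
      answerLoop n k fuel (j + 1)
        (result - PySem.Int.floordiv (PySem.Int.floordiv k i * (j - i + 1) * (j + i)) 2)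
    else result

-- body of A below the 'if n > k' test (A's recursive call answer(k, k) takes this branch)
def answerCore (n : Int) (k : Int) : Int := answerLoop n k n.toNat 1 (n * k)

def answer (n : Int) (k : Int) : Int :=
  if n > k then answerCore k k + (n - k) * k else answerCore n k

-- ===== PORT B =====
-- B's hand-written integer-sqrt loop (r = 0; while (r+1)*(r+1) <= k: r += 1);
-- fuel only makes it structurally terminating (k.toNat + 1 steps always suffice)
def isqrtLoop (k : Int) : Nat → Int → Int
  | 0, r => r
  | fuel + 1, r => if (r + 1) * (r + 1) ≤ k then isqrtLoop k fuel (r + 1) else r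

def answer_alt (n : Int) (k : Int) : Int :=
  let m := min n k
  let r := isqrtLoop k (k.toNat + 1) 0
  let s1 := (PySem.List.pyRange 1 (min m r + 1) 1).foldl
      (fun s i => s + PySem.Int.floordiv k i * i) 0
  let s2 := (PySem.List.pyRange 1 (PySem.Int.floordiv k (r + 1) + 1) 1).foldl
      (fun s q =>
        let lo := max r (PySem.Int.floordiv k (q + 1))
        let hi := min m (PySem.Int.floordiv k q)
        if lo < hi then
          s + q * (PySem.Int.floordiv (hi * (hi + 1)) 2 - PySem.Int.floordiv (lo * (lo + 1)) 2)
        else s) s1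
  n * k - s2

-- ===== PRECONDITION & SPEC =====
def Spec_answer (n : Int) (k : Int) (out : Int) : Prop := out = answer_alt n k
instance (n : Int) (k : Int) (out : Int) : Decidable (Spec_answer n k out) := by unfold Spec_answer; infer_instance

-- ===== CLAIM (what is proved, stated in full; the proofs are below) =====
def Claim_equal_answer : Prop := ∀ (n : Int) (k : Int), Dom_answer n k → Spec_answer n k (answer n k)

-- ===== LEMMAS AND PROOFS =====

-- split an integer-interval sum at an interior point
theorem sum_Ioc_split_int (f : Int → Int) (a b c : Int) (h1 : a ≤ b) (h2 : b ≤ c) :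
    (∑ t ∈ Finset.Ioc a b, f t) + (∑ t ∈ Finset.Ioc b c, f t) = ∑ t ∈ Finset.Ioc a c, f t := by
  rw [← Finset.Ioc_union_Ioc_eq_Ioc h1 h2, Finset.sum_union]
  rw [Finset.disjoint_left]
  intro t ht1 ht2
  simp only [Finset.mem_Ioc] at ht1 ht2
  omega

-- sum over the integer interval Ioc a b, successor form
theorem sum_Ioc_succ_int (f : Int → Int) (a b : Int) (h : a ≤ b) :
    (∑ t ∈ Finset.Ioc a (b + 1), f t) = (∑ t ∈ Finset.Ioc a b, f t) + f (b + 1) := by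
  have h1 : Finset.Ioc a (b + 1) = insert (b + 1) (Finset.Ioc a b) := by
    ext t; simp only [Finset.mem_Ioc, Finset.mem_insert]; omega
  rw [h1, Finset.sum_insert (by simp [Finset.mem_Ioc])]
  ring

-- Gauss: twice the sum of t over Ioc (i-1) j
theorem gauss_Ioc (i j : Int) (h : i ≤ j + 1) :
    2 * (∑ t ∈ Finset.Ioc (i - 1) j, t) = (j - i + 1) * (j + i) := by
  obtain ⟨m, hm⟩ : ∃ m : Nat, j = i - 1 + m := ⟨(j - i + 1).toNat, by omega⟩
  subst hm
  induction m with
  | zero => simp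
  | succ p ih =>
    have hle : i - 1 ≤ i - 1 + (p : Int) := by omega
    have := sum_Ioc_succ_int (fun t => t) (i - 1) (i - 1 + p) hle
    push_cast at this ⊢
    rw [show (i - 1 + ((p : Int) + 1)) = (i - 1 + (p : Int)) + 1 by ring, this]
    have ih' := ih (by omega)
    push_cast at ih'
    nlinarith [ih']

-- quotients are constant on a divisor block: for i ≤ t ≤ k/(k/i), k/t = k/i
theorem fdiv_block_const (k i t : Int) (hi : 0 < i) (hik : i ≤ k)
    (hit : i ≤ t) (htj : t ≤ PySem.Int.floordiv k (PySem.Int.floordiv k i)) :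
    PySem.Int.floordiv k t = PySem.Int.floordiv k i := by
  have ht : 0 < t := by omega
  rw [PySem.Int.floordiv_eq_ediv_of_pos hi] at htj ⊢
  rw [PySem.Int.floordiv_eq_ediv_of_pos ht]
  set q := k / i with hq
  have hq1 : 1 ≤ q := by
    rw [hq]; exact (Int.le_ediv_iff_mul_le hi).2 (by omega)
  rw [PySem.Int.floordiv_eq_ediv_of_pos (by omega : (0:Int) < q)] at htj
  -- lower bound: q ≤ k / t, since q * t ≤ k
  have hqt : q * t ≤ k := by
    have := (Int.le_ediv_iff_mul_le (by omega : (0:Int) < q)).1 htj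
    nlinarith
  have h1 : q ≤ k / t := (Int.le_ediv_iff_mul_le ht).2 hqt
  -- upper bound: k / t ≤ q, since k < (q+1) * i ≤ (q+1) * t
  have hk1 : k < (q + 1) * i := by
    have hmod := Int.emod_lt_of_pos k hi
    have hdm := Int.mul_ediv_add_emod k i
    nlinarith
  have h2 : k / t < q + 1 := by
    apply (Int.ediv_lt_iff_lt_mul ht).2
    nlinarith
  omega

-- loop invariant: answerLoop subtracts the whole remaining sum of (k//t)*t
theorem answerLoop_inv (fuel : Nat) :
    ∀ (n k i result : Int), 1 ≤ i → n ≤ k →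
    (n + 1 - i).toNat ≤ fuel →
    answerLoop n k fuel i result
      = result - ∑ t ∈ Finset.Ioc (i - 1) n, PySem.Int.floordiv k t * t := by
  induction fuel with
  | zero =>
    intro n k i result h1 _ hf
    have : Finset.Ioc (i - 1) n = ∅ := Finset.Ioc_eq_empty (by omega)
    simp [answerLoop, this]
  | succ f ih =>
    intro n k i result h1 hnk hf
    by_cases hin : i ≤ n
    · have hik : i ≤ k := le_trans hin hnk
      have hi0 : (0:Int) < i := by omega
      have hfd : PySem.Int.floordiv k i = k / i := PySem.Int.floordiv_eq_ediv_of_pos hi0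
      have hq1 : 1 ≤ k / i := (Int.le_ediv_iff_mul_le hi0).2 (by omega)
      have hfd2 : PySem.Int.floordiv k (k / i) = k / (k / i) :=
        PySem.Int.floordiv_eq_ediv_of_pos (by omega)
      simp only [answerLoop, if_pos hin, hfd, hfd2]
      set j := min n (k / (k / i)) with hjdef
      have hij : i ≤ j := by
        refine le_min hin ?_
        refine (Int.le_ediv_iff_mul_le (by omega : (0:Int) < k / i)).2 ?_
        have hdm := Int.mul_ediv_add_emod k i
        have hm := Int.emod_nonneg k (by omega : i ≠ 0)
        nlinarith
      have hjn : j ≤ n := min_le_left _ _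
      -- the subtracted block equals the sum of (k//t)*t over Ioc (i-1) j
      have hconst : ∀ t ∈ Finset.Ioc (i - 1) j, PySem.Int.floordiv k t * t = (k / i) * t := by
        intro t ht
        simp only [Finset.mem_Ioc] at ht
        have := fdiv_block_const k i t hi0 hik (by omega)
          (by rw [hfd, hfd2]; exact le_trans ht.2 (min_le_right _ _))
        rw [this, hfd]
      have hblock : PySem.Int.floordiv (k / i * (j - i + 1) * (j + i)) 2
          = ∑ t ∈ Finset.Ioc (i - 1) j, PySem.Int.floordiv k t * t := by
        rw [Finset.sum_congr rfl hconst, ← Finset.mul_sum]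
        have hg := gauss_Ioc i j (by omega)
        have h2 : k / i * (j - i + 1) * (j + i)
            = 2 * ((k / i) * ∑ t ∈ Finset.Ioc (i - 1) j, t) := by nlinarith
        rw [h2, PySem.Int.floordiv_eq_ediv_of_pos (by omega : (0:Int) < 2),
            Int.mul_ediv_cancel_left _ (by omega : (2:Int) ≠ 0)]
      have hsplit := sum_Ioc_split_int
        (fun t : Int => PySem.Int.floordiv k t * t) (i - 1) j n (by omega) hjn
      rw [ih n k (j + 1) _ (by omega) hnk (by omega)]
      rw [show j + 1 - 1 = j by ring, hblock]
      simp only at hsplit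
      omega
    · have : Finset.Ioc (i - 1) n = ∅ := Finset.Ioc_eq_empty (by omega)
      simp [answerLoop, if_neg hin, this]

-- A's core below the branch
theorem answerCore_eq (n k : Int) (hn : 0 ≤ n) (hnk : n ≤ k) :
    answerCore n k = n * k - ∑ t ∈ Finset.Ioc 0 n, PySem.Int.floordiv k t * t := by
  rw [answerCore, answerLoop_inv n.toNat n k 1 (n * k) (by omega) hnk (by omega)]
  norm_num

-- characterisation of A on every input
theorem answer_eq (n k : Int) :
    answer n k = n * k - ∑ t ∈ Finset.Ioc 0 (min n k), PySem.Int.floordiv k t * t := by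
  unfold answer
  by_cases hnk : n > k
  · rw [if_pos hnk]
    by_cases hk : 0 ≤ k
    · rw [answerCore_eq k k hk le_rfl, min_eq_right (by omega)]
      ring
    · -- k < 0: A's loop never runs (answerCore k k = k*k) and the sum is empty
      have h0 : Finset.Ioc 0 (min n k) = ∅ := Finset.Ioc_eq_empty (by omega)
      have : answerCore k k = k * k := by
        have : k.toNat = 0 := by omega
        rw [answerCore, this, answerLoop]
      rw [this, h0]
      simp only [Finset.sum_empty]
      ring
  · rw [if_neg hnk, min_eq_left (by omega)]
    by_cases hn : 0 ≤ n
    · exact answerCore_eq n k hn (by omega)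
    · -- n < 0: the loop never runs and the sum is empty
      have h0 : Finset.Ioc 0 n = ∅ := Finset.Ioc_eq_empty (by omega)
      have : answerCore n k = n * k := by
        have : n.toNat = 0 := by omega
        rw [answerCore, this, answerLoop]
      rw [this, h0]
      simp only [Finset.sum_empty]
      ring

-- B's accumulation loops compute interval sums
theorem foldl_add_Ioc (f : Int → Int) (x : Int) :
    ∀ c : Int, (PySem.List.pyRange 1 (x + 1) 1).foldl (fun s i => s + f i) c
      = c + ∑ t ∈ Finset.Ioc 0 x, f t := by
  by_cases hx : x ≤ 0
  · intro c
    rw [PySem.List.pyRange_one_eq_nil (by omega), Finset.Ioc_eq_empty (by omega)]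
    simp
  · obtain ⟨m, hm⟩ : ∃ m : Nat, x = (m : Int) := ⟨x.toNat, by omega⟩
    subst hm
    induction m with
    | zero => simp at hx
    | succ p ih =>
      intro c
      by_cases hp : (p : Int) ≤ 0
      · have hp0 : p = 0 := by omega
        subst hp0
        rw [show ((1 : Nat) : Int) + 1 = 1 + 1 by norm_num,
            PySem.List.pyRange_one_succ_right (by omega), PySem.List.pyRange_one_eq_nil le_rfl]
        have : Finset.Ioc (0:Int) 1 = {1} := by
          ext t; simp only [Finset.mem_Ioc, Finset.mem_singleton]; omega
        simp [this]
      · have hsp : PySem.List.pyRange 1 ((p : Int) + 1 + 1) 1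
            = PySem.List.pyRange 1 ((p : Int) + 1) 1 ++ [(p : Int) + 1] :=
          PySem.List.pyRange_one_succ_right (by omega)
        rw [show ((p + 1 : Nat) : Int) + 1 = ((p : Int) + 1) + 1 by push_cast; ring, hsp,
            List.foldl_append, ih (by omega) c]
        simp only [List.foldl]
        rw [show ((p + 1 : Nat) : Int) = (p : Int) + 1 by push_cast; ring,
            sum_Ioc_succ_int f 0 (p : Int) (by omega)]
        ring

-- the isqrt loop never returns a negative value
theorem isqrtLoop_nonneg (k : Int) : ∀ (fuel : Nat) (r : Int), 0 ≤ r → 0 ≤ isqrtLoop k fuel r := by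
  intro fuel
  induction fuel with
  | zero => intro r hr; simpa [isqrtLoop] using hr
  | succ f ih =>
    intro r hr
    rw [isqrtLoop]
    split
    · exact ih (r + 1) (by omega)
    · exact hr

-- division by a larger positive divisor gives a smaller quotient (k ≥ 0)
theorem ediv_anti (k a b : Int) (hk : 0 ≤ k) (ha : 0 < a) (hab : a ≤ b) : k / b ≤ k / a := by
  refine (Int.le_ediv_iff_mul_le ha).2 ?_
  have h1 : 0 ≤ k / b := Int.ediv_nonneg hk (by omega)
  have h2 : k / b * b ≤ k := Int.ediv_mul_le k (by omega)
  nlinarith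

-- the divisor-block bracket: for positive t and q, k//t = q iff k//(q+1) < t ≤ k//q
theorem ediv_eq_iff_bracket (k t q : Int) (ht : 0 < t) (hq : 0 < q) :
    k / t = q ↔ (k / (q + 1) < t ∧ t ≤ k / q) := by
  constructor
  · intro h
    constructor
    · by_contra hcon
      rw [not_lt] at hcon
      have h1 : (q + 1) * t ≤ k := by
        have := (Int.le_ediv_iff_mul_le (by omega : (0:Int) < q + 1)).1 hcon
        nlinarith
      have : q + 1 ≤ k / t := (Int.le_ediv_iff_mul_le ht).2 (by nlinarith)
      omega
    · refine (Int.le_ediv_iff_mul_le hq).2 ?_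
      have := Int.ediv_mul_le k (by omega : t ≠ 0)
      nlinarith [h]
  · rintro ⟨h1, h2⟩
    have hq1 : q ≤ k / t := by
      refine (Int.le_ediv_iff_mul_le ht).2 ?_
      have := (Int.le_ediv_iff_mul_le hq).1 h2
      nlinarith
    have hq2 : k / t < q + 1 := by
      refine (Int.ediv_lt_iff_lt_mul ht).2 ?_
      have := (Int.ediv_lt_iff_lt_mul (by omega : (0:Int) < q + 1)).1 h1
      nlinarith
    omega

-- the closed-form triangular difference is the interval sum (lo < hi)
theorem tri_diff_eq_sum (lo hi : Int) (h : lo ≤ hi) :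
    PySem.Int.floordiv (hi * (hi + 1)) 2 - PySem.Int.floordiv (lo * (lo + 1)) 2
      = ∑ t ∈ Finset.Ioc lo hi, t := by
  obtain ⟨a, ha⟩ := Int.even_mul_succ_self hi
  obtain ⟨b, hb⟩ := Int.even_mul_succ_self lo
  have h2 := gauss_Ioc (lo + 1) hi (by omega)
  rw [show lo + 1 - 1 = lo by ring] at h2
  rw [ha, hb, show a + a = 2 * a by ring, show b + b = 2 * b by ring,
      PySem.Int.floordiv_eq_ediv_of_pos (by omega : (0:Int) < 2),
      PySem.Int.floordiv_eq_ediv_of_pos (by omega : (0:Int) < 2),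
      Int.mul_ediv_cancel_left _ (by omega : (2:Int) ≠ 0),
      Int.mul_ediv_cancel_left _ (by omega : (2:Int) ≠ 0)]
  nlinarith

-- B's quotient pass covers exactly the indices above min m r
theorem part2_eq (m r k : Int) (hr : 0 ≤ r) (hmk : m ≤ k) :
    (∑ q ∈ Finset.Ioc 0 (k / (r + 1)),
        (if max r (k / (q + 1)) < min m (k / q) then
          q * (PySem.Int.floordiv (min m (k / q) * (min m (k / q) + 1)) 2
             - PySem.Int.floordiv (max r (k / (q + 1)) * (max r (k / (q + 1)) + 1)) 2)
        else 0))
      = ∑ t ∈ Finset.Ioc (min m r) m, PySem.Int.floordiv k t * t := by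
  by_cases hmr : m ≤ r
  · -- nothing above the split point: every block is empty
    rw [min_eq_left hmr, show Finset.Ioc m m = ∅ by simp]
    rw [Finset.sum_empty]
    refine Finset.sum_eq_zero ?_
    intro q _
    rw [if_neg (by
      have h1 : min m (k / q) ≤ m := min_le_left _ _
      have h2 : r ≤ max r (k / (q + 1)) := le_max_left _ _
      omega)]
  · -- r < m ≤ k: fiber the interval Ioc r m by the quotient q = k // t
    rw [not_le] at hmr
    have hk : 0 < k := by omega
    rw [min_eq_right (by omega)]
    rw [← Finset.sum_fiberwise_of_maps_to
      (g := fun t => k / t) (t := Finset.Ioc 0 (k / (r + 1)))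
      (fun t ht => by
        simp only [Finset.mem_Ioc] at ht ⊢
        constructor
        · exact (Int.le_ediv_iff_mul_le (by omega : (0:Int) < t)).2 (by nlinarith)
        · exact ediv_anti k (r + 1) t (by omega) (by omega) (by omega))
      (fun t => PySem.Int.floordiv k t * t)]
    refine Finset.sum_congr rfl ?_
    intro q hq
    simp only [Finset.mem_Ioc] at hq
    have hfiber : {t ∈ Finset.Ioc r m | k / t = q}
        = Finset.Ioc (max r (k / (q + 1))) (min m (k / q)) := by
      ext t
      simp only [Finset.mem_filter, Finset.mem_Ioc, le_min_iff, max_lt_iff]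
      constructor
      · rintro ⟨⟨h1, h2⟩, h3⟩
        have := (ediv_eq_iff_bracket k t q (by omega) (by omega)).1 h3
        exact ⟨⟨h1, this.1⟩, h2, this.2⟩
      · rintro ⟨⟨h1, h2⟩, h3, h4⟩
        exact ⟨⟨h1, h3⟩, (ediv_eq_iff_bracket k t q (by omega) (by omega)).2 ⟨h2, h4⟩⟩
    rw [hfiber]
    by_cases hblk : max r (k / (q + 1)) < min m (k / q)
    · rw [if_pos hblk]
      have hconst : ∀ t ∈ Finset.Ioc (max r (k / (q + 1))) (min m (k / q)),
          PySem.Int.floordiv k t * t = q * t := by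
        intro t ht
        simp only [Finset.mem_Ioc, max_lt_iff, le_min_iff] at ht
        have hkt : k / t = q :=
          (ediv_eq_iff_bracket k t q (by omega) (by omega)).2 ⟨ht.1.2, ht.2.2⟩
        rw [PySem.Int.floordiv_eq_ediv_of_pos (by omega : (0:Int) < t), hkt]
      rw [Finset.sum_congr rfl hconst, ← Finset.mul_sum,
          tri_diff_eq_sum _ _ (by omega)]
    · rw [if_neg hblk, Finset.Ioc_eq_empty (by omega), Finset.sum_empty]

-- characterisation of B on every input
theorem answer_alt_eq (n k : Int) :
    answer_alt n k = n * k - ∑ t ∈ Finset.Ioc 0 (min n k), PySem.Int.floordiv k t * t := by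
  have hr0 : 0 ≤ isqrtLoop k (k.toNat + 1) 0 := isqrtLoop_nonneg k _ 0 le_rfl
  simp only [answer_alt]
  set r := isqrtLoop k (k.toNat + 1) 0 with hrdef
  set m := min n k with hmdef
  have hfd1 : ∀ q : Int, 0 < q → PySem.Int.floordiv k q = k / q := fun q hq =>
    PySem.Int.floordiv_eq_ediv_of_pos hq
  rw [foldl_add_Ioc (fun i => PySem.Int.floordiv k i * i) (min m r) 0]
  have hbody : (fun (s q : Int) =>
        if max r (PySem.Int.floordiv k (q + 1)) < min m (PySem.Int.floordiv k q) then
          s + q * (PySem.Int.floordiv (min m (PySem.Int.floordiv k q) * (min m (PySem.Int.floordiv k q) + 1)) 2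
             - PySem.Int.floordiv (max r (PySem.Int.floordiv k (q + 1)) * (max r (PySem.Int.floordiv k (q + 1)) + 1)) 2)
        else s)
      = (fun (s q : Int) => s +
          (if max r (PySem.Int.floordiv k (q + 1)) < min m (PySem.Int.floordiv k q) then
            q * (PySem.Int.floordiv (min m (PySem.Int.floordiv k q) * (min m (PySem.Int.floordiv k q) + 1)) 2
               - PySem.Int.floordiv (max r (PySem.Int.floordiv k (q + 1)) * (max r (PySem.Int.floordiv k (q + 1)) + 1)) 2)
          else 0)) := by
    funext s q
    split <;> simp
  simp only [hbody]
  rw [foldl_add_Ioc _ (PySem.Int.floordiv k (r + 1))]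
  rw [hfd1 (r + 1) (by omega)]
  have hcongr2 : ∀ q ∈ Finset.Ioc 0 (k / (r + 1)),
      (if max r (PySem.Int.floordiv k (q + 1)) < min m (PySem.Int.floordiv k q) then
          q * (PySem.Int.floordiv (min m (PySem.Int.floordiv k q) * (min m (PySem.Int.floordiv k q) + 1)) 2
             - PySem.Int.floordiv (max r (PySem.Int.floordiv k (q + 1)) * (max r (PySem.Int.floordiv k (q + 1)) + 1)) 2)
        else 0)
      = (if max r (k / (q + 1)) < min m (k / q) then
          q * (PySem.Int.floordiv (min m (k / q) * (min m (k / q) + 1)) 2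
             - PySem.Int.floordiv (max r (k / (q + 1)) * (max r (k / (q + 1)) + 1)) 2)
        else 0) := by
    intro q hq
    simp only [Finset.mem_Ioc] at hq
    rw [hfd1 q (by omega), hfd1 (q + 1) (by omega)]
  rw [Finset.sum_congr rfl hcongr2, part2_eq m r k hr0 (min_le_right n k)]
  by_cases hm : 0 ≤ m
  · have hsp := sum_Ioc_split_int (fun t : Int => PySem.Int.floordiv k t * t)
      0 (min m r) m (le_min hm hr0) (min_le_left _ _)
    simp only at hsp
    linarith
  · rw [min_eq_left (by omega : m ≤ r)]
    rw [show Finset.Ioc (0:Int) m = ∅ from Finset.Ioc_eq_empty (by omega),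
        show Finset.Ioc m m = ∅ by simp]
    simp

-- ===== VERDICT (by name: the statement is the Claim_ definition above) =====
theorem answer_spec : Claim_equal_answer := by
  intro n k _
  unfold Spec_answer
  rw [answer_eq, answer_alt_eq]
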